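/- GENERATED by tools/from_farm_form.py from prooffarm-gif/accepted/GifMakeMapObject.2/Proof.lean (a worked proof of the farm's unit `GifMakeMapObject.2`,
   accepted by the verdict) — do not edit. -/
import Gif.Spec.Units.GifMakeMapObject_2
import Gif.Spec.Proved.GifMakeMapObject_2_Lemmas

open X86 X86.User Asan ProgX.Base ProgX.Base.Spec Gif.Spec

/-- Segment 2 of `GifMakeMapObject` (0x10793b … 0x1079a7; gifalloc.c:57-72): the three lemmas of Lemmas.lean, chained.
   `calloc(count, 3)` (both outcomes at ret3), then by the ghost heap: no room — the checked store of NULL, `free(Object)` —,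
   or room — the four checked stores, `memcpy` unless `ColorMap` is NULL. -/
theorem Gif.Spec.Proved.GifMakeMapObject_2_ok : Gif.Spec.GifMakeMapObject_2.Statement := by
  intro Lay hLay μ hμ u₀ hcode h_calloc h_memcpy h_free h_store8 h_store4 h_store1 H rest frames count e ret v hat
  -- 0x10793b … ret3: `calloc(count, 3)` over the heap with the `ColorMapObject`
  refine (Gif.Spec.GifMakeMapObject_2.mm2_seg_calloc Lay hLay μ hμ u₀ hcode H rest frames count e ret
    (h_calloc (H.push 24 (r16 24)) rest frames) v hat).trans ?_
  intro w hw
  by_cases hf : (H.push 24 (r16 24)).Fits (r16 (3 * count))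
  · -- room: the map
    refine (Gif.Spec.GifMakeMapObject_2.mm2_seg_fill Lay hLay μ hμ u₀ hcode H rest frames count e ret
      (h_memcpy _ frames) h_store8 h_store4 h_store1 w hw hf).mono ?_
    intro w' hw'
    exact ⟨_, hw'⟩
  · -- no room: the `ColorMapObject` is freed again
    refine (Gif.Spec.GifMakeMapObject_2.mm2_seg_fail Lay hLay μ hμ u₀ hcode H rest frames count e ret
      (h_free (H.push 24 (r16 24)) rest frames 24) h_store8 w hw hf).mono ?_
    intro w' hw'
    exact ⟨_, hw'⟩
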